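-- pv_equiv track=rewrite | github.com/MrHamdulay/csc3-capstone | examples/data/Assignment_7/fnsdan001/push.py | push_right
-- ===== SOURCE A (Python) =====
-- def push_right(grid):
--     rgrid = [[],[],[],[]]
--     returngrid = [[],[],[],[]]
--     zero = [[],[],[],[]]
--     for num in range(4):
--         sgrid = [x for x in grid[num] if x is not 0]
--         rgrid[num] = [0]*(4-len(sgrid))
--         for i in range(len(sgrid)):
--             rgrid[num].append(sgrid[i])
--
--         for i in range (2,-1, -1):
--
--             if rgrid[num][i] == rgrid[num] [i+1]:
--                 rgrid[num][i+1] = rgrid[num][i]*2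
--                 rgrid[num][i] = 0
--         zero[num] = [x for x in rgrid[num] if x is not 0]
--
--         returngrid[num] = [0]*(4-len(zero[num]))
--         for i in range(len(zero[num])):
--             returngrid[num].append(zero[num][i])
--
--
--
--     for i in range(4):
--         grid[i] = returngrid[i]
--     return returngrid
-- ===== SOURCE B (Python) =====
-- def _merge_rev(rev):
--     # rev holds a row's nonzero tiles right-to-left; merge greedily from the right.
--     if len(rev) >= 2 and rev[0] == rev[1]:
--         return [rev[0] * 2] + _merge_rev(rev[2:])
--     if rev:
--         return [rev[0]] + _merge_rev(rev[1:])
--     return []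
--
--
-- def push_right(grid):
--     out = []
--     for i in range(4):
--         tiles = [x for x in grid[i] if x is not 0]
--         merged = _merge_rev(tiles[::-1])[::-1]
--         row = [0] * (4 - len(merged)) + merged
--         out.append(row)
--         grid[i] = row
--     return out
-- ===== Notes on version B (the rewrite author's own statement) =====
-- stated objective: simpler
-- what changed: A pads each row to 4, runs a fixed-window index loop (i=2,1,0) that merges in place, then refilters and repads; B compresses the nonzero tiles once and merges them with a single recursive greedy right-to-left pass, then left-pads.
import Mathlib
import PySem

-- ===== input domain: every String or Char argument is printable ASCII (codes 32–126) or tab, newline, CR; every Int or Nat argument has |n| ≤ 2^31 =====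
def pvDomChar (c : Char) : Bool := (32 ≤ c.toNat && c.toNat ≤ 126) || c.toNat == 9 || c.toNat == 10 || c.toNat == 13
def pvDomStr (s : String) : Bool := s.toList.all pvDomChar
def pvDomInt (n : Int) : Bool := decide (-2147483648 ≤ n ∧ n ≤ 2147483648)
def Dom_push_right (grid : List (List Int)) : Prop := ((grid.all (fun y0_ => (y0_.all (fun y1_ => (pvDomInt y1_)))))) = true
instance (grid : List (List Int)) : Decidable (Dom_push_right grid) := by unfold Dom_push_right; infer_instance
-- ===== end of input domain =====

-- B replaces A's pad/fixed-window-merge/refilter/repad pipeline by one recursive greedy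
-- right-to-left merge of the nonzero tiles (objective: simpler). Equivalence is about the
-- RETURN value; both A and B also overwrite grid[0..3] in place with the same rows.

-- ===== PORT A =====
-- `x is not 0` on Python ints is exactly `x ≠ 0` (0 is the cached int singleton).
-- grid[num] is (pyGet? grid num).getD []: exact under Pre_ (grid has ≥ 4 rows; Python
-- raises IndexError on shorter grids, excluded by Pre_). The rgrid row always has length
-- ≥ 4, so pyGetD/pySetD at the loop indices 0..3 are exact. The three Python lists rgrid,
-- returngrid, zero (each initialised [[],[],[],[]], assigned at index num) are carried as
-- a foldl state triple over range(4); the `for i in range(len(...)): .append(...)` loops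
-- are folds appending the same elements in the same order; the final `grid[i] =
-- returngrid[i]` loop only mutates the argument and the function returns returngrid.
def push_right (grid : List (List Int)) : List (List Int) :=
  let st := (PySem.List.pyRange 0 4 1).foldl
    (fun (st : List (List Int) × List (List Int) × List (List Int)) (num : Int) =>
      let rgrid := st.1
      let returngrid := st.2.1
      let zero := st.2.2
      let sgrid := ((PySem.List.pyGet? grid num).getD []).filter (fun x => x ≠ 0)
      -- rgrid[num] = [0]*(4-len(sgrid)); then for i in range(len(sgrid)): append sgrid[i]
      let rrow := sgrid.foldl (fun r x => r ++ [x]) (List.replicate (4 - sgrid.length) 0)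
      -- for i in range(2,-1,-1): the merge on indices 0..3
      let rrow := (PySem.List.pyRange 2 (-1) (-1)).foldl
        (fun r i =>
          if PySem.List.pyGetD r i 0 = PySem.List.pyGetD r (i + 1) 0 then
            let r := PySem.List.pySetD r (i + 1) (PySem.List.pyGetD r i 0 * 2)
            PySem.List.pySetD r i 0
          else r) rrow
      let rgrid := PySem.List.pySetD rgrid num rrow
      let zrow := rrow.filter (fun x => x ≠ 0)
      let zero := PySem.List.pySetD zero num zrow
      let retrow := zrow.foldl (fun r x => r ++ [x]) (List.replicate (4 - zrow.length) 0)
      let returngrid := PySem.List.pySetD returngrid num retrow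
      (rgrid, returngrid, zero))
    ([[], [], [], []], [[], [], [], []], [[], [], [], []])
  st.2.1

-- ===== PORT B =====
-- _merge_rev: greedy merge of the reversed (right-to-left) nonzero tiles.
def mergeRev : List Int → List Int
  | a :: b :: rest => if a = b then a * 2 :: mergeRev rest else a :: mergeRev (b :: rest)
  | [a] => [a]
  | [] => []

-- grid[i] and the `x is not 0` filter as in port A; tiles[::-1] is List.reverse.
def push_right_alt (grid : List (List Int)) : List (List Int) :=
  (PySem.List.pyRange 0 4 1).foldl
    (fun (out : List (List Int)) (i : Int) =>
      let tiles := ((PySem.List.pyGet? grid i).getD []).filter (fun x => x ≠ 0)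
      let merged := (mergeRev tiles.reverse).reverse
      let row := List.replicate (4 - merged.length) 0 ++ merged
      out ++ [row]) []

-- ===== PRECONDITION & SPEC =====
-- Pre_ restricts to the task's natural domain: grids with at least 4 rows (A raises
-- IndexError on fewer) whose first 4 rows each hold at most 4 nonzero tiles — on a row
-- with more than 4 nonzero tiles A still returns, but its value (a merge over the fixed
-- index window 0..3 of a longer tile list) is an artefact of A's implementation.
def Pre_push_right (grid : List (List Int)) : Prop :=
  4 ≤ grid.length ∧ ∀ row ∈ grid.take 4, (row.filter (fun x => x ≠ 0)).length ≤ 4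
instance (grid : List (List Int)) : Decidable (Pre_push_right grid) := by
  unfold Pre_push_right; infer_instance

def pvWitness_push_right : List (List Int) :=
  [[2, 2, 0, 4], [0, 0, 0, 0], [2, 0, 2, 0], [4, 4, 4, 4]]

def Spec_push_right (grid : List (List Int)) (out : List (List Int)) : Prop := out = push_right_alt grid
instance (grid : List (List Int)) (out : List (List Int)) : Decidable (Spec_push_right grid out) := by unfold Spec_push_right; infer_instance

-- ===== CLAIM (what is proved, stated in full; the proofs are below) =====
def Claim_equal_push_right : Prop := ∀ (grid : List (List Int)), Dom_push_right grid → Pre_push_right grid → Spec_push_right grid (push_right grid)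

-- ===== LEMMAS AND PROOFS =====

-- A's per-row pipeline applied to the already-filtered tile list s.
def coreA (s : List Int) : List Int :=
  let rrow := s.foldl (fun r x => r ++ [x]) (List.replicate (4 - s.length) 0)
  let rrow := (PySem.List.pyRange 2 (-1) (-1)).foldl
    (fun r i =>
      if PySem.List.pyGetD r i 0 = PySem.List.pyGetD r (i + 1) 0 then
        let r := PySem.List.pySetD r (i + 1) (PySem.List.pyGetD r i 0 * 2)
        PySem.List.pySetD r i 0
      else r) rrow
  let zrow := rrow.filter (fun x => x ≠ 0)
  zrow.foldl (fun r x => r ++ [x]) (List.replicate (4 - zrow.length) 0)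

-- B's per-row pipeline applied to the tile list s.
def coreB (s : List Int) : List Int :=
  let merged := (mergeRev s.reverse).reverse
  List.replicate (4 - merged.length) 0 ++ merged

theorem range210 : PySem.List.pyRange 2 (-1) (-1) = [2, 1, 0] := by decide

-- pyGetD/pySetD evaluated on a 4-element row at the literal loop indices (second forms
-- match the un-normalised `i + 1` the fold produces).
theorem g0 (x0 x1 x2 x3 : Int) : PySem.List.pyGetD [x0,x1,x2,x3] 0 0 = x0 := rfl
theorem g1 (x0 x1 x2 x3 : Int) : PySem.List.pyGetD [x0,x1,x2,x3] 1 0 = x1 := rfl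
theorem g2 (x0 x1 x2 x3 : Int) : PySem.List.pyGetD [x0,x1,x2,x3] 2 0 = x2 := rfl
theorem g1' (x0 x1 x2 x3 : Int) : PySem.List.pyGetD [x0,x1,x2,x3] (0+1) 0 = x1 := rfl
theorem g2' (x0 x1 x2 x3 : Int) : PySem.List.pyGetD [x0,x1,x2,x3] (1+1) 0 = x2 := rfl
theorem g3' (x0 x1 x2 x3 : Int) : PySem.List.pyGetD [x0,x1,x2,x3] (2+1) 0 = x3 := rfl
theorem s0 (x0 x1 x2 x3 v : Int) : PySem.List.pySetD [x0,x1,x2,x3] 0 v = [v,x1,x2,x3] := rfl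
theorem s1 (x0 x1 x2 x3 v : Int) : PySem.List.pySetD [x0,x1,x2,x3] 1 v = [x0,v,x2,x3] := rfl
theorem s2 (x0 x1 x2 x3 v : Int) : PySem.List.pySetD [x0,x1,x2,x3] 2 v = [x0,x1,v,x3] := rfl
theorem s1' (x0 x1 x2 x3 v : Int) : PySem.List.pySetD [x0,x1,x2,x3] (0+1) v = [x0,v,x2,x3] := rfl
theorem s2' (x0 x1 x2 x3 v : Int) : PySem.List.pySetD [x0,x1,x2,x3] (1+1) v = [x0,x1,v,x3] := rfl
theorem s3' (x0 x1 x2 x3 v : Int) : PySem.List.pySetD [x0,x1,x2,x3] (2+1) v = [x0,x1,x2,v] := rfl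

set_option maxHeartbeats 2000000 in
theorem core_eq (s : List Int) (hnz : ∀ x ∈ s, x ≠ 0) (hlen : s.length ≤ 4) :
    coreA s = coreB s := by
  match s, hnz, hlen with
  | [], _, _ => rfl
  | [a], hnz, _ =>
    have ha : a ≠ 0 := hnz a (by simp)
    simp only [coreA, coreB, range210, List.foldl, List.length, List.replicate,
      List.cons_append, List.nil_append,
      g0, g1, g2, g1', g2', g3', s0, s1, s2, s1', s2', s3']
    split_ifs <;>
      simp_all only [g0, g1, g2, g1', g2', g3', s0, s1, s2, s1', s2', s3',
        List.cons_append, List.nil_append] <;>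
      simp_all [List.filter, mergeRev, eq_comm]
  | [a, b], hnz, _ =>
    have ha : a ≠ 0 := hnz a (by simp)
    have hb : b ≠ 0 := hnz b (by simp)
    simp only [coreA, coreB, range210, List.foldl, List.length, List.replicate,
      List.cons_append, List.nil_append,
      g0, g1, g2, g1', g2', g3', s0, s1, s2, s1', s2', s3']
    split_ifs <;>
      simp_all only [g0, g1, g2, g1', g2', g3', s0, s1, s2, s1', s2', s3',
        List.cons_append, List.nil_append] <;>
      simp_all [List.filter, mergeRev, eq_comm]
  | [a, b, c], hnz, _ =>
    have ha : a ≠ 0 := hnz a (by simp)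
    have hb : b ≠ 0 := hnz b (by simp)
    have hc : c ≠ 0 := hnz c (by simp)
    simp only [coreA, coreB, range210, List.foldl, List.length, List.replicate,
      List.cons_append, List.nil_append,
      g0, g1, g2, g1', g2', g3', s0, s1, s2, s1', s2', s3']
    split_ifs <;>
      simp_all only [g0, g1, g2, g1', g2', g3', s0, s1, s2, s1', s2', s3',
        List.cons_append, List.nil_append] <;>
      simp_all [List.filter, mergeRev, eq_comm]
  | [a, b, c, d], hnz, _ =>
    have ha : a ≠ 0 := hnz a (by simp)
    have hb : b ≠ 0 := hnz b (by simp)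
    have hc : c ≠ 0 := hnz c (by simp)
    have hd : d ≠ 0 := hnz d (by simp)
    simp only [coreA, coreB, range210, List.foldl, List.length, List.replicate,
      List.cons_append, List.nil_append,
      g0, g1, g2, g1', g2', g3', s0, s1, s2, s1', s2', s3']
    split_ifs <;>
      simp_all only [g0, g1, g2, g1', g2', g3', s0, s1, s2, s1', s2', s3',
        List.cons_append, List.nil_append] <;>
      simp_all [List.filter, mergeRev, eq_comm]
  | _ :: _ :: _ :: _ :: _ :: _, _, hlen => simp at hlen; omega

-- push_right is rowA of the four indexed rows, push_right_alt is rowB of them.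
theorem push_right_rows (grid : List (List Int)) :
    push_right grid =
      [coreA (((PySem.List.pyGet? grid 0).getD []).filter (fun x => x ≠ 0)),
       coreA (((PySem.List.pyGet? grid 1).getD []).filter (fun x => x ≠ 0)),
       coreA (((PySem.List.pyGet? grid 2).getD []).filter (fun x => x ≠ 0)),
       coreA (((PySem.List.pyGet? grid 3).getD []).filter (fun x => x ≠ 0))] := rfl

theorem push_right_alt_rows (grid : List (List Int)) :
    push_right_alt grid =
      [coreB (((PySem.List.pyGet? grid 0).getD []).filter (fun x => x ≠ 0)),
       coreB (((PySem.List.pyGet? grid 1).getD []).filter (fun x => x ≠ 0)),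
       coreB (((PySem.List.pyGet? grid 2).getD []).filter (fun x => x ≠ 0)),
       coreB (((PySem.List.pyGet? grid 3).getD []).filter (fun x => x ≠ 0))] := rfl

theorem row_core_eq (grid : List (List Int)) (hlen : 4 ≤ grid.length)
    (hrows : ∀ row ∈ grid.take 4, (row.filter (fun x => x ≠ 0)).length ≤ 4)
    (n : Nat) (hn : n < 4) :
    coreA (((PySem.List.pyGet? grid (n : Int)).getD []).filter (fun x => x ≠ 0)) =
      coreB (((PySem.List.pyGet? grid (n : Int)).getD []).filter (fun x => x ≠ 0)) := by
  have hg : (PySem.List.pyGet? grid (n : Int)).getD [] = grid[n]'(by omega) := by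
    rw [PySem.List.pyGet?_natCast]
    simp [List.getElem?_eq_getElem (by omega : n < grid.length)]
  have hmem : grid[n]'(by omega) ∈ grid.take 4 := by
    have : (grid.take 4)[n]'(by simp; omega) = grid[n]'(by omega) := List.getElem_take
    exact this ▸ List.getElem_mem _
  refine core_eq _ ?_ ?_
  · intro x hx
    simpa using (List.mem_filter.mp hx).2
  · rw [hg]; exact hrows _ hmem

-- ===== VERDICT (by name: the statement is the Claim_ definition above) =====
theorem push_right_spec : Claim_equal_push_right := by
  intro grid _ hpre
  obtain ⟨hlen, hrows⟩ := hpre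
  unfold Spec_push_right
  rw [push_right_rows, push_right_alt_rows]
  have e0 := row_core_eq grid hlen hrows 0 (by omega)
  have e1 := row_core_eq grid hlen hrows 1 (by omega)
  have e2 := row_core_eq grid hlen hrows 2 (by omega)
  have e3 := row_core_eq grid hlen hrows 3 (by omega)
  norm_cast at e0 e1 e2 e3
  rw [e0, e1, e2, e3]
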